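-- pv_equiv track=rewrite | github.com/weikunhan/leetcode-summary-python | python_practice/amazon/min_hour.py | min_hour
-- ===== SOURCE A (Python) =====
-- import collections
--
-- def min_hour(rows, colums, grid):
--     """
--     :type rows: int
--     :type colums: int
--     :type grid: List[List[int]]
--     :rtype: int
--     """
--
--     value_list = collections.deque()
--     res = -1
--
--     if not grid:
--         res = 0
--
--         return res
--
--     for i in range(rows):
--         for j in range(colums):
--             if grid[i][j] == 1:
--                 value_list.append((i, j))
--
--     while value_list:
--         temp_value = len(value_list)
--         res += 1
--
--         for _ in range(temp_value):
--             i, j = value_list.popleft()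
--
--             for a, b in [(i - 1, j), (i + 1, j), (i, j - 1), (i, j + 1)]:
--                 if a >= 0 and a < rows and b >= 0 and b < colums and grid[a][b] != 1:
--                     grid[a][b] = 1
--                     value_list.append((a, b))
--
--     return res
-- ===== SOURCE B (Python) =====
-- def min_hour(rows, colums, grid):
--     """No BFS at all: since every non-1 cell is infectable, the hour a cell is
--     reached is its minimum Manhattan distance to a source, so the answer is the
--     maximum over all cells of that distance (closed-form distance computation).
--     Does not mutate grid (A marks cells in place; return value is identical)."""
--     if not grid:
--         return 0
--     src = [(i, j) for i in range(rows) for j in range(colums) if grid[i][j] == 1]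
--     if not src:
--         return -1
--     return max(min(abs(i - a) + abs(j - b) for a, b in src)
--                for i in range(rows) for j in range(colums))
-- ===== Notes on version B (the rewrite author's own statement) =====
-- stated objective: simpler
-- what changed: Drops the BFS/flood-fill entirely: since every non-1 cell is infectable, the spread time of a cell is its minimum Manhattan distance to a 1-cell, so B returns the maximum over all cells of that minimum via a direct distance formula (no queue, no grid mutation).
import Mathlib
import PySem

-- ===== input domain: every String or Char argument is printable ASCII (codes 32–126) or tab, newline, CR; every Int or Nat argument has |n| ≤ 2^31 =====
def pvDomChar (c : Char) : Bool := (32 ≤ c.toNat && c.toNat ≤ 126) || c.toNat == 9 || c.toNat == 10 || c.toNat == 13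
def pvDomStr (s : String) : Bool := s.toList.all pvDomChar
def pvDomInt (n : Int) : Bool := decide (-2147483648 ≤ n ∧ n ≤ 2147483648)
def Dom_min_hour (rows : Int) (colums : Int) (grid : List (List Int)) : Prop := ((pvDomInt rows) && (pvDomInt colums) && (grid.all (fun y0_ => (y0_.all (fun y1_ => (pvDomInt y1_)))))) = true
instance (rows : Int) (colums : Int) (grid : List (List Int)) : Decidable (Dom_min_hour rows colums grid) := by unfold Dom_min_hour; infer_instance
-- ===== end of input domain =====

-- B drops the BFS entirely: every non-1 cell is infectable, so a cell's hour is its minimum Manhattan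
-- distance to a 1-cell and the answer is the maximum of those minima (closed-form, no queue). A mutates
-- `grid` in place while B does not; the equivalence proved here is about the return value only.

-- ===== PORT A =====
-- grid[i][j] for the nonnegative indices A uses; an out-of-range read raises in Python and is excluded
-- by Pre_min_hour (the Lean default is never reached inside Pre_).
def pvCellA (g : List (List Int)) (i j : Int) : Int := (g.getD i.toNat []).getD j.toNat 0

-- grid[i][j] = v (List.set is a no-op out of range; exact in range, which Pre_ guarantees)
def pvSetA (g : List (List Int)) (i j : Int) (v : Int) : List (List Int) :=
  g.set i.toNat ((g.getD i.toNat []).set j.toNat v)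

-- 'for i in range(rows): for j in range(colums): if grid[i][j] == 1: value_list.append((i, j))'
def pvSrcA (rows colums : Int) (grid : List (List Int)) : List (Int × Int) :=
  (PySem.List.pyRange 0 rows 1).foldl (fun acc i =>
    (PySem.List.pyRange 0 colums 1).foldl (fun acc2 j =>
      if pvCellA grid i j = 1 then acc2 ++ [(i, j)] else acc2) acc) []

-- 'for a, b in [(i-1,j),(i+1,j),(i,j-1),(i,j+1)]: if in bounds and grid[a][b] != 1: mark, append'
def pvNbrA (rows colums : Int) (i j : Int) (st : List (List Int) × List (Int × Int)) :
    List (List Int) × List (Int × Int) :=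
  [(i - 1, j), (i + 1, j), (i, j - 1), (i, j + 1)].foldl (fun st ab =>
    if 0 ≤ ab.1 ∧ ab.1 < rows ∧ 0 ≤ ab.2 ∧ ab.2 < colums ∧ pvCellA st.1 ab.1 ab.2 ≠ 1 then
      (pvSetA st.1 ab.1 ab.2 1, st.2 ++ [ab])
    else st) st

-- 'for _ in range(temp_value): i, j = value_list.popleft(); …'
def pvStepA (rows colums : Int) : Nat → List (Int × Int) → List (List Int) →
    List (Int × Int) × List (List Int)
  | 0, q, g => (q, g)
  | k + 1, q, g =>
    match q with
    | [] => ([], g)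
    | p :: rest =>
      let st := pvNbrA rows colums p.1 p.2 (g, rest)
      pvStepA rows colums k st.2 st.1

-- 'while value_list: temp_value = len(value_list); res += 1; …' — the fuel argument is only a
-- totality guard; 2*rows*colums+1 is proved sufficient under Pre_ below
def pvLoopA (rows colums : Int) : Nat → List (Int × Int) → List (List Int) → Int → Int
  | 0, _, _, res => res
  | f + 1, q, g, res =>
    if q = [] then res
    else
      let st := pvStepA rows colums q.length q g
      pvLoopA rows colums f st.1 st.2 (res + 1)

def min_hour (rows : Int) (colums : Int) (grid : List (List Int)) : Int :=
  if grid = [] then 0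
  else pvLoopA rows colums (2 * rows.toNat * colums.toNat + 1) (pvSrcA rows colums grid) grid (-1)

-- ===== PORT B =====
def pvCellB (g : List (List Int)) (i j : Int) : Int := (g.getD i.toNat []).getD j.toNat 0

-- '[(i, j) for i in range(rows) for j in range(colums) if grid[i][j] == 1]'
def pvSrcB (rows colums : Int) (grid : List (List Int)) : List (Int × Int) :=
  (PySem.List.pyRange 0 rows 1).flatMap (fun i =>
    ((PySem.List.pyRange 0 colums 1).filter (fun j => pvCellB grid i j = 1)).map (fun j => (i, j)))

-- 'max(min(abs(i-a)+abs(j-b) for a,b in src) for i in range(rows) for j in range(colums))';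
-- min/max of the guarded-nonempty generators via PySem.List.min?/max? (.getD unreachable under the guards)
def min_hour_alt (rows : Int) (colums : Int) (grid : List (List Int)) : Int :=
  if grid = [] then 0
  else
    let src := pvSrcB rows colums grid
    if src = [] then -1
    else
      (PySem.List.max? ((PySem.List.pyRange 0 rows 1).flatMap (fun i =>
          (PySem.List.pyRange 0 colums 1).map (fun j =>
            (PySem.List.min? (src.map (fun s => |i - s.1| + |j - s.2|)) (fun y => y)).getD 0)))
        (fun y => y)).getD 0

-- ===== PRECONDITION & SPEC =====
-- exactly the inputs on which the Python A returns normally: A raises IndexError iff the grid is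
-- nonempty, rows > 0, colums > 0 and the scanned rows×colums rectangle reaches outside the grid
def Pre_min_hour (rows : Int) (colums : Int) (grid : List (List Int)) : Prop :=
  grid = [] ∨ rows ≤ 0 ∨ colums ≤ 0 ∨
    (rows.toNat ≤ grid.length ∧ ∀ row ∈ grid.take rows.toNat, colums.toNat ≤ row.length)

instance (rows : Int) (colums : Int) (grid : List (List Int)) :
    Decidable (Pre_min_hour rows colums grid) := by unfold Pre_min_hour; infer_instance

def pvWitness_min_hour : Int × Int × List (List Int) := (2, 3, [[1, 0, 0], [0, 0, 2]])

def Spec_min_hour (rows : Int) (colums : Int) (grid : List (List Int)) (out : Int) : Prop :=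
  out = min_hour_alt rows colums grid

instance (rows : Int) (colums : Int) (grid : List (List Int)) (out : Int) :
    Decidable (Spec_min_hour rows colums grid out) := by unfold Spec_min_hour; infer_instance

-- ===== CLAIM (what is proved, stated in full; the proofs are below) =====
def Claim_equal_min_hour : Prop := ∀ (rows : Int) (colums : Int) (grid : List (List Int)),
  Dom_min_hour rows colums grid → Pre_min_hour rows colums grid →
    Spec_min_hour rows colums grid (min_hour rows colums grid)

-- ===== LEMMAS AND PROOFS =====

-- the scanned rectangle, adjacency and Manhattan distance (proof-side vocabulary)
def pvInR (rows colums : Int) (c : Int × Int) : Prop :=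
  0 ≤ c.1 ∧ c.1 < rows ∧ 0 ≤ c.2 ∧ c.2 < colums

def pvNbrs (c : Int × Int) : List (Int × Int) :=
  [(c.1 - 1, c.2), (c.1 + 1, c.2), (c.1, c.2 - 1), (c.1, c.2 + 1)]

def pvMan (c s : Int × Int) : Int := |c.1 - s.1| + |c.2 - s.2|

-- the per-cell minimum B computes: min Manhattan distance to a source
def pvDist (S : List (Int × Int)) (c : Int × Int) : Int :=
  (PySem.List.min? (S.map (fun s => pvMan c s)) (fun y => y)).getD 0

def pvMk (g : List (List Int)) (c : Int × Int) : Prop := pvCellA g c.1 c.2 = 1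

-- shape invariant maintained by the BFS: the rows×colums rectangle lies inside the grid
def pvWF (rows colums : Int) (g : List (List Int)) : Prop :=
  ∀ a : Nat, a < rows.toNat → a < g.length ∧ colums.toNat ≤ (g.getD a []).length

def pvRect (rows colums : Int) : List (Int × Int) :=
  (PySem.List.pyRange 0 rows 1).flatMap (fun a =>
    (PySem.List.pyRange 0 colums 1).map (fun b => (a, b)))

-- pure form of one neighbour expansion: the resulting grid and the freshly pushed cells
def pvCore (rows colums : Int) : List (Int × Int) → List (List Int) →
    List (List Int) × List (Int × Int)
  | [], g => (g, [])
  | ab :: cs, g =>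
    if 0 ≤ ab.1 ∧ ab.1 < rows ∧ 0 ≤ ab.2 ∧ ab.2 < colums ∧ pvCellA g ab.1 ab.2 ≠ 1 then
      let r := pvCore rows colums cs (pvSetA g ab.1 ab.2 1)
      (r.1, ab :: r.2)
    else pvCore rows colums cs g

-- one whole BFS level in pure form
def pvProcL (rows colums : Int) : List (Int × Int) → List (List Int) →
    List (List Int) × List (Int × Int)
  | [], g => (g, [])
  | p :: ps, g =>
    let r := pvCore rows colums (pvNbrs p) g
    let r2 := pvProcL rows colums ps r.1
    (r2.1, r.2 ++ r2.2)

-- the loop invariant: grid marked = cells at distance ≤ ℓ, queue = cells at distance exactly ℓ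
def pvInv (rows colums : Int) (S : List (Int × Int)) (ℓ : Nat) (g : List (List Int))
    (q : List (Int × Int)) : Prop :=
  pvWF rows colums g ∧
  (∀ c, pvInR rows colums c → (pvMk g c ↔ pvDist S c ≤ (ℓ : Int))) ∧
  q.Nodup ∧
  (∀ c, c ∈ q ↔ pvInR rows colums c ∧ pvDist S c = (ℓ : Int))

-- ---- basic facts about pvMan / pvDist ----

lemma pvMan_eq (c s : Int × Int) :
    pvMan c s = ((c.1 - s.1).natAbs : Int) + ((c.2 - s.2).natAbs : Int) := by
  unfold pvMan
  rw [Int.abs_eq_natAbs, Int.abs_eq_natAbs]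

lemma pvDist_some {S : List (Int × Int)} (hS : S ≠ []) (c : Int × Int) :
    PySem.List.min? (S.map (fun s => pvMan c s)) (fun y => y) = some (pvDist S c) := by
  cases h : PySem.List.min? (S.map (fun s => pvMan c s)) (fun y => y) with
  | none => exact absurd (List.map_eq_nil_iff.mp ((PySem.List.min?_eq_none_iff _ _).mp h)) hS
  | some m => simp [pvDist, h]

lemma pvDist_le {S : List (Int × Int)} (hS : S ≠ []) (c s : Int × Int) (hs : s ∈ S) :
    pvDist S c ≤ pvMan c s :=
  PySem.List.min?_isMin (pvDist_some hS c) _ (List.mem_map_of_mem hs)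

lemma pvDist_attained {S : List (Int × Int)} (hS : S ≠ []) (c : Int × Int) :
    ∃ s ∈ S, pvDist S c = pvMan c s := by
  have := PySem.List.min?_mem (pvDist_some hS c)
  rcases List.mem_map.mp this with ⟨s, hs, he⟩
  exact ⟨s, hs, he.symm⟩

lemma pvDist_nonneg {S : List (Int × Int)} (hS : S ≠ []) (c : Int × Int) :
    0 ≤ pvDist S c := by
  rcases pvDist_attained hS c with ⟨s, _, he⟩
  rw [he, pvMan_eq]; positivity

lemma pvMan_triangle (a b c : Int × Int) : pvMan a c ≤ pvMan a b + pvMan b c := by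
  unfold pvMan
  have h1 := abs_sub_le a.1 b.1 c.1
  have h2 := abs_sub_le a.2 b.2 c.2
  linarith

lemma pvDist_lipschitz {S : List (Int × Int)} (hS : S ≠ []) (c p : Int × Int)
    (h : pvMan c p = 1) : pvDist S c ≤ pvDist S p + 1 := by
  rcases pvDist_attained hS p with ⟨s, hs, he⟩
  have := pvDist_le hS c s hs
  have := pvMan_triangle c p s
  omega

lemma pvDist_zero {S : List (Int × Int)} (hS : S ≠ []) (c : Int × Int) :
    pvDist S c = 0 ↔ c ∈ S := by
  constructor
  · intro h
    rcases pvDist_attained hS c with ⟨s, hs, he⟩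
    have : c = s := by
      rw [h, pvMan_eq] at he
      exact Prod.ext (by omega) (by omega)
    rwa [this]
  · intro h
    have h1 := pvDist_le hS c c h
    have h2 := pvDist_nonneg hS c
    rw [pvMan_eq] at h1
    omega

lemma mem_pvNbrs (c p : Int × Int) : c ∈ pvNbrs p ↔ pvMan c p = 1 := by
  simp only [pvNbrs, List.mem_cons, List.not_mem_nil, or_false]
  constructor
  · rintro (rfl | rfl | rfl | rfl)
    · show |p.1 - 1 - p.1| + |p.2 - p.2| = 1
      simp only [Int.abs_eq_natAbs]; omega
    · show |p.1 + 1 - p.1| + |p.2 - p.2| = 1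
      simp only [Int.abs_eq_natAbs]; omega
    · show |p.1 - p.1| + |p.2 - 1 - p.2| = 1
      simp only [Int.abs_eq_natAbs]; omega
    · show |p.1 - p.1| + |p.2 + 1 - p.2| = 1
      simp only [Int.abs_eq_natAbs]; omega
  · intro h
    rw [pvMan_eq] at h
    have hc : (c.1 = p.1 - 1 ∧ c.2 = p.2) ∨ (c.1 = p.1 + 1 ∧ c.2 = p.2) ∨
        (c.1 = p.1 ∧ c.2 = p.2 - 1) ∨ (c.1 = p.1 ∧ c.2 = p.2 + 1) := by omega
    rcases hc with ⟨h1, h2⟩ | ⟨h1, h2⟩ | ⟨h1, h2⟩ | ⟨h1, h2⟩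
    · exact Or.inl (Prod.ext h1 h2)
    · exact Or.inr (Or.inl (Prod.ext h1 h2))
    · exact Or.inr (Or.inr (Or.inl (Prod.ext h1 h2)))
    · exact Or.inr (Or.inr (Or.inr (Prod.ext h1 h2)))

-- one step toward the nearest source: a cell at positive distance has an in-rectangle neighbour
-- one closer (intermediate cells stay in the rectangle because sources are in it)
lemma pvToward (rows colums : Int) {S : List (Int × Int)} (hS : S ≠ [])
    (hSR : ∀ s ∈ S, pvInR rows colums s) (c : Int × Int) (hc : pvInR rows colums c)
    (h1 : 1 ≤ pvDist S c) :
    ∃ p, pvInR rows colums p ∧ pvMan c p = 1 ∧ pvDist S p = pvDist S c - 1 := by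
  rcases pvDist_attained hS c with ⟨s, hs, he⟩
  have hsR := hSR s hs
  obtain ⟨hc1, hc2, hc3, hc4⟩ := hc
  obtain ⟨hs1, hs2, hs3, hs4⟩ := hsR
  rw [pvMan_eq] at he
  have key : ∃ p : Int × Int, pvInR rows colums p ∧ pvMan c p = 1 ∧ pvMan p s + 1 = pvMan c s := by
    by_cases h : c.1 < s.1
    · refine ⟨(c.1 + 1, c.2),
        show 0 ≤ c.1 + 1 ∧ c.1 + 1 < rows ∧ 0 ≤ c.2 ∧ c.2 < colums from by omega, ?_, ?_⟩
      · show |c.1 - (c.1 + 1)| + |c.2 - c.2| = 1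
        simp only [Int.abs_eq_natAbs]; omega
      · show |c.1 + 1 - s.1| + |c.2 - s.2| + 1 = |c.1 - s.1| + |c.2 - s.2|
        simp only [Int.abs_eq_natAbs]; omega
    · by_cases h' : s.1 < c.1
      · refine ⟨(c.1 - 1, c.2),
          show 0 ≤ c.1 - 1 ∧ c.1 - 1 < rows ∧ 0 ≤ c.2 ∧ c.2 < colums from by omega, ?_, ?_⟩
        · show |c.1 - (c.1 - 1)| + |c.2 - c.2| = 1
          simp only [Int.abs_eq_natAbs]; omega
        · show |c.1 - 1 - s.1| + |c.2 - s.2| + 1 = |c.1 - s.1| + |c.2 - s.2|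
          simp only [Int.abs_eq_natAbs]; omega
      · by_cases h2 : c.2 < s.2
        · refine ⟨(c.1, c.2 + 1),
            show 0 ≤ c.1 ∧ c.1 < rows ∧ 0 ≤ c.2 + 1 ∧ c.2 + 1 < colums from by omega, ?_, ?_⟩
          · show |c.1 - c.1| + |c.2 - (c.2 + 1)| = 1
            simp only [Int.abs_eq_natAbs]; omega
          · show |c.1 - s.1| + |c.2 + 1 - s.2| + 1 = |c.1 - s.1| + |c.2 - s.2|
            simp only [Int.abs_eq_natAbs]; omega
        · have h2' : s.2 < c.2 := by omega
          refine ⟨(c.1, c.2 - 1),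
            show 0 ≤ c.1 ∧ c.1 < rows ∧ 0 ≤ c.2 - 1 ∧ c.2 - 1 < colums from by omega, ?_, ?_⟩
          · show |c.1 - c.1| + |c.2 - (c.2 - 1)| = 1
            simp only [Int.abs_eq_natAbs]; omega
          · show |c.1 - s.1| + |c.2 - 1 - s.2| + 1 = |c.1 - s.1| + |c.2 - s.2|
            simp only [Int.abs_eq_natAbs]; omega
  rcases key with ⟨p, hpR, hp1, hp2⟩
  refine ⟨p, hpR, hp1, ?_⟩
  have hub : pvDist S p ≤ pvMan c s - 1 := by
    have := pvDist_le hS p s hs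
    omega
  have hlb := pvDist_lipschitz hS c p hp1
  rw [pvMan_eq] at hub
  omega

lemma pvExistsLevel (rows colums : Int) {S : List (Int × Int)} (hS : S ≠ [])
    (hSR : ∀ s ∈ S, pvInR rows colums s) (ℓ : Int) (h0 : 0 ≤ ℓ) :
    ∀ (n : Nat) (c : Int × Int), pvInR rows colums c → pvDist S c = ℓ + n →
      ∃ c', pvInR rows colums c' ∧ pvDist S c' = ℓ := by
  intro n
  induction n with
  | zero => intro c hc hd; exact ⟨c, hc, by simpa using hd⟩
  | succ n ih =>
    intro c hc hd
    have h1 : 1 ≤ pvDist S c := by omega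
    rcases pvToward rows colums hS hSR c hc h1 with ⟨p, hpR, _, hpd⟩
    exact ih p hpR (by omega)

-- ---- grid update lemmas ----

lemma pvSetA_length (g : List (List Int)) (i j v : Int) : (pvSetA g i j v).length = g.length := by
  simp [pvSetA]

lemma pvSetA_row_len (g : List (List Int)) (i j v : Int) (a : Nat) :
    ((pvSetA g i j v).getD a []).length = (g.getD a []).length := by
  unfold pvSetA
  simp only [List.getD_eq_getElem?_getD]
  by_cases hi : i.toNat < g.length
  · by_cases ha : i.toNat = a
    · rw [← ha, List.getElem?_set_self hi, Option.getD_some, List.getElem?_eq_getElem hi,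
        Option.getD_some, List.length_set]
    · rw [List.getElem?_set_ne ha]
  · rw [List.set_eq_of_length_le (by omega)]

lemma pvWF_set (rows colums : Int) (g : List (List Int)) (i j v : Int)
    (h : pvWF rows colums g) : pvWF rows colums (pvSetA g i j v) := by
  intro a ha
  rcases h a ha with ⟨h1, h2⟩
  refine ⟨by rwa [pvSetA_length], by rwa [pvSetA_row_len]⟩

lemma pvCell_set_self (g : List (List Int)) (a b v : Int)
    (ha : a.toNat < g.length) (hb : b.toNat < (g.getD a.toNat []).length) :
    pvCellA (pvSetA g a b v) a b = v := by
  unfold pvCellA pvSetA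
  simp only [List.getD_eq_getElem?_getD]
  rw [List.getElem?_set_self ha, Option.getD_some,
    List.getElem?_set_self (by simpa [List.getD_eq_getElem?_getD] using hb), Option.getD_some]

lemma pvCell_set_ne (g : List (List Int)) (a b x y v : Int)
    (h : x.toNat ≠ a.toNat ∨ y.toNat ≠ b.toNat) :
    pvCellA (pvSetA g a b v) x y = pvCellA g x y := by
  unfold pvCellA pvSetA
  simp only [List.getD_eq_getElem?_getD]
  rcases h with h | h
  · rw [List.getElem?_set_ne (show a.toNat ≠ x.toNat by omega)]
  · by_cases hx : x.toNat = a.toNat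
    · rw [hx]
      by_cases hi : a.toNat < g.length
      · rw [List.getElem?_set_self hi, Option.getD_some, List.getElem?_eq_getElem hi,
          Option.getD_some, List.getElem?_set_ne (show b.toNat ≠ y.toNat by omega)]
      · rw [List.set_eq_of_length_le (by omega)]
    · rw [List.getElem?_set_ne (fun hh => hx hh.symm)]

lemma pvMk_set_self (rows colums : Int) (g : List (List Int)) (ab : Int × Int)
    (hw : pvWF rows colums g) (hab : pvInR rows colums ab) :
    pvMk (pvSetA g ab.1 ab.2 1) ab := by
  obtain ⟨h1, h2, h3, h4⟩ := hab
  have ha : ab.1.toNat < g.length := (hw ab.1.toNat (by omega)).1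
  have hb : ab.2.toNat < (g.getD ab.1.toNat []).length := by
    have := (hw ab.1.toNat (by omega)).2; omega
  exact pvCell_set_self g ab.1 ab.2 1 ha hb

lemma pvMk_set_iff (rows colums : Int) (g : List (List Int)) (ab c : Int × Int)
    (hw : pvWF rows colums g) (hab : pvInR rows colums ab) (hc : pvInR rows colums c) :
    (pvMk (pvSetA g ab.1 ab.2 1) c ↔ pvMk g c ∨ c = ab) := by
  by_cases hce : c = ab
  · subst hce
    simp [pvMk_set_self rows colums g c hw hab]
  · have hne : c.1.toNat ≠ ab.1.toNat ∨ c.2.toNat ≠ ab.2.toNat := by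
      by_contra hcon
      rw [not_or, not_not, not_not] at hcon
      obtain ⟨ha1, _, hb1, _⟩ := hab
      obtain ⟨hc1, _, hd1, _⟩ := hc
      exact hce (Prod.ext (by omega) (by omega))
    unfold pvMk
    rw [pvCell_set_ne g ab.1 ab.2 c.1 c.2 1 hne]
    simp [hce]

-- ---- core / level expansion specs ----

lemma pvCore_spec (rows colums : Int) :
    ∀ (cs : List (Int × Int)) (g : List (List Int)), pvWF rows colums g →
      pvWF rows colums (pvCore rows colums cs g).1 ∧
      (∀ c, pvInR rows colums c →
        (pvMk (pvCore rows colums cs g).1 c ↔ pvMk g c ∨ c ∈ cs)) ∧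
      (∀ c, c ∈ (pvCore rows colums cs g).2 ↔ c ∈ cs ∧ pvInR rows colums c ∧ ¬ pvMk g c) ∧
      (pvCore rows colums cs g).2.Nodup := by
  intro cs
  induction cs with
  | nil => intro g hg; refine ⟨hg, by simp [pvCore], by simp [pvCore], by simp [pvCore]⟩
  | cons ab cs ih =>
    intro g hg
    by_cases hcond : 0 ≤ ab.1 ∧ ab.1 < rows ∧ 0 ≤ ab.2 ∧ ab.2 < colums ∧ pvCellA g ab.1 ab.2 ≠ 1
    · have habR : pvInR rows colums ab := ⟨hcond.1, hcond.2.1, hcond.2.2.1, hcond.2.2.2.1⟩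
      have hnm : ¬ pvMk g ab := hcond.2.2.2.2
      have hw1 := pvWF_set rows colums g ab.1 ab.2 1 hg
      obtain ⟨iw, imk, imem, ind⟩ := ih (pvSetA g ab.1 ab.2 1) hw1
      simp only [pvCore, if_pos hcond]
      refine ⟨iw, ?_, ?_, ?_⟩
      · intro c hc
        rw [imk c hc, pvMk_set_iff rows colums g ab c hg habR hc]
        simp only [List.mem_cons]
        tauto
      · intro c
        simp only [List.mem_cons]
        constructor
        · rintro (rfl | h)
          · exact ⟨Or.inl rfl, habR, hnm⟩
          · obtain ⟨h1, h2, h3⟩ := (imem c).mp h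
            rw [pvMk_set_iff rows colums g ab c hg habR h2] at h3
            exact ⟨Or.inr h1, h2, fun hm => h3 (Or.inl hm)⟩
        · rintro ⟨hm, h2, h3⟩
          by_cases hce : c = ab
          · exact Or.inl hce
          · rcases hm with rfl | h1
            · exact absurd rfl hce
            · refine Or.inr ((imem c).mpr ⟨h1, h2, ?_⟩)
              rw [pvMk_set_iff rows colums g ab c hg habR h2]
              rintro (hmk | rfl)
              · exact h3 hmk
              · exact hce rfl
      · rw [List.nodup_cons]
        refine ⟨fun hmem => ?_, ind⟩
        obtain ⟨_, h2, h3⟩ := (imem ab).mp hmem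
        exact h3 (pvMk_set_self rows colums g ab hg habR)
    · obtain ⟨iw, imk, imem, ind⟩ := ih g hg
      simp only [pvCore, if_neg hcond]
      refine ⟨iw, ?_, ?_, ind⟩
      · intro c hc
        rw [imk c hc]
        simp only [List.mem_cons]
        constructor
        · rintro (h | h)
          · exact Or.inl h
          · exact Or.inr (Or.inr h)
        · rintro (h | rfl | h)
          · exact Or.inl h
          · left
            by_contra hnm
            exact hcond ⟨hc.1, hc.2.1, hc.2.2.1, hc.2.2.2, hnm⟩
          · exact Or.inr h
      · intro c
        rw [imem c]
        simp only [List.mem_cons]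
        constructor
        · rintro ⟨h1, h2, h3⟩; exact ⟨Or.inr h1, h2, h3⟩
        · rintro ⟨(rfl | h1), h2, h3⟩
          · exact absurd ⟨h2.1, h2.2.1, h2.2.2.1, h2.2.2.2, h3⟩ hcond
          · exact ⟨h1, h2, h3⟩

lemma pvProcL_spec (rows colums : Int) :
    ∀ (pend : List (Int × Int)) (g : List (List Int)), pvWF rows colums g →
      pvWF rows colums (pvProcL rows colums pend g).1 ∧
      (∀ c, pvInR rows colums c →
        (pvMk (pvProcL rows colums pend g).1 c ↔ pvMk g c ∨ ∃ p ∈ pend, c ∈ pvNbrs p)) ∧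
      (∀ c, c ∈ (pvProcL rows colums pend g).2 ↔
        pvInR rows colums c ∧ ¬ pvMk g c ∧ ∃ p ∈ pend, c ∈ pvNbrs p) ∧
      (pvProcL rows colums pend g).2.Nodup := by
  intro pend
  induction pend with
  | nil => intro g hg; refine ⟨hg, by simp [pvProcL], by simp [pvProcL], by simp [pvProcL]⟩
  | cons p ps ih =>
    intro g hg
    obtain ⟨cw, cmk, cmem, cnd⟩ := pvCore_spec rows colums (pvNbrs p) g hg
    obtain ⟨iw, imk, imem, ind⟩ := ih (pvCore rows colums (pvNbrs p) g).1 cw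
    simp only [pvProcL]
    refine ⟨iw, ?_, ?_, ?_⟩
    · intro c hc
      rw [imk c hc, cmk c hc]
      simp only [List.mem_cons]
      constructor
      · rintro ((h | h) | ⟨q, hq, hn⟩)
        · exact Or.inl h
        · exact Or.inr ⟨p, Or.inl rfl, h⟩
        · exact Or.inr ⟨q, Or.inr hq, hn⟩
      · rintro (h | ⟨q, (rfl | hq), hn⟩)
        · exact Or.inl (Or.inl h)
        · exact Or.inl (Or.inr hn)
        · exact Or.inr ⟨q, hq, hn⟩
    · intro c
      simp only [List.mem_append]
      rw [imem c, cmem c]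
      constructor
      · rintro (⟨h1, h2, h3⟩ | ⟨h1, h2, q, hq, hn⟩)
        · exact ⟨h2, h3, p, List.mem_cons_self, h1⟩
        · rw [cmk c h1] at h2
          exact ⟨h1, fun hm => h2 (Or.inl hm), q, List.mem_cons_of_mem _ hq, hn⟩
      · rintro ⟨h1, h2, q, hq, hn⟩
        rcases List.mem_cons.mp hq with rfl | hq'
        · exact Or.inl ⟨hn, h1, h2⟩
        · by_cases hp : c ∈ pvNbrs p
          · exact Or.inl ⟨hp, h1, h2⟩
          · refine Or.inr ⟨h1, ?_, q, hq', hn⟩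
            rw [cmk c h1]
            rintro (hm | hm)
            · exact h2 hm
            · exact hp hm
    · refine List.Nodup.append cnd ind ?_
      intro c hc1 hc2
      obtain ⟨h1, h2, _⟩ := (cmem c).mp hc1
      obtain ⟨h4, h5, _⟩ := (imem c).mp hc2
      exact h5 ((cmk c h4).mpr (Or.inr h1))

-- ---- one BFS level preserves the invariant ----

lemma pvStep_inv (rows colums : Int) {S : List (Int × Int)} (hS : S ≠ [])
    (hSR : ∀ s ∈ S, pvInR rows colums s) (ℓ : Nat) (g : List (List Int)) (q : List (Int × Int))
    (h : pvInv rows colums S ℓ g q) :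
    pvInv rows colums S (ℓ + 1) (pvProcL rows colums q g).1 (pvProcL rows colums q g).2 := by
  obtain ⟨hw, hmk, hnd, hq⟩ := h
  obtain ⟨pw, pmk, pmem, pnd⟩ := pvProcL_spec rows colums q g hw
  refine ⟨pw, ?_, pnd, ?_⟩
  · intro c hc
    rw [pmk c hc, hmk c hc]
    constructor
    · rintro (h1 | ⟨p, hp, hn⟩)
      · push_cast; omega
      · obtain ⟨hpR, hpd⟩ := (hq p).mp hp
        have hman := (mem_pvNbrs c p).mp hn
        have := pvDist_lipschitz hS c p hman
        push_cast at *
        omega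
    · intro h1
      by_cases h2 : pvDist S c ≤ (ℓ : Int)
      · exact Or.inl h2
      · have hd : pvDist S c = (ℓ : Int) + 1 := by push_cast at h1; omega
        rcases pvToward rows colums hS hSR c hc (by omega) with ⟨p, hpR, hman, hpd⟩
        refine Or.inr ⟨p, (hq p).mpr ⟨hpR, by omega⟩, (mem_pvNbrs c p).mpr hman⟩
  · intro c
    rw [pmem c]
    constructor
    · rintro ⟨h1, h2, p, hp, hn⟩
      obtain ⟨hpR, hpd⟩ := (hq p).mp hp
      have hman := (mem_pvNbrs c p).mp hn
      have hlip := pvDist_lipschitz hS c p hman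
      have hgt : ¬ pvDist S c ≤ (ℓ : Int) := fun hle => h2 ((hmk c h1).mpr hle)
      refine ⟨h1, by push_cast; omega⟩
    · rintro ⟨h1, h2⟩
      have h2' : ¬ pvDist S c ≤ (ℓ : Int) := by push_cast at h2 ⊢; omega
      have h1d : 1 ≤ pvDist S c := by push_cast at h2; omega
      rcases pvToward rows colums hS hSR c h1 h1d with ⟨p, hpR, hman, hpd⟩
      exact ⟨h1, fun hm => h2' ((hmk c h1).mp hm), p,
        (hq p).mpr ⟨hpR, by push_cast at h2 ⊢; omega⟩, (mem_pvNbrs c p).mpr hman⟩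

lemma foldA_core (rows colums : Int) :
    ∀ (cs : List (Int × Int)) (g : List (List Int)) (q : List (Int × Int)),
    cs.foldl (fun st ab =>
        if 0 ≤ ab.1 ∧ ab.1 < rows ∧ 0 ≤ ab.2 ∧ ab.2 < colums ∧ pvCellA st.1 ab.1 ab.2 ≠ 1 then
          (pvSetA st.1 ab.1 ab.2 1, st.2 ++ [ab])
        else st) (g, q)
      = ((pvCore rows colums cs g).1, q ++ (pvCore rows colums cs g).2) := by
  intro cs
  induction cs with
  | nil => intro g q; simp [pvCore]
  | cons ab cs ih =>
    intro g q
    simp only [List.foldl_cons, pvCore]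
    split
    · rw [ih]; simp
    · rw [ih]


-- A's inner for-loop over one level equals the pure level expansion
lemma pvStep_procL (rows colums : Int) :
    ∀ (pend acc : List (Int × Int)) (g : List (List Int)),
      pvStepA rows colums pend.length (pend ++ acc) g
        = (acc ++ (pvProcL rows colums pend g).2, (pvProcL rows colums pend g).1) := by
  intro pend
  induction pend with
  | nil => intro acc g; simp [pvStepA, pvProcL]
  | cons p ps ih =>
    intro acc g
    have hfold : pvNbrA rows colums p.1 p.2 (g, ps ++ acc)
        = ((pvCore rows colums (pvNbrs p) g).1,
           (ps ++ acc) ++ (pvCore rows colums (pvNbrs p) g).2) :=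
      foldA_core rows colums (pvNbrs p) g (ps ++ acc)
    simp only [List.length_cons, List.cons_append, pvStepA, hfold]
    rw [List.append_assoc]
    rw [ih (acc ++ (pvCore rows colums (pvNbrs p) g).2) (pvCore rows colums (pvNbrs p) g).1]
    simp only [pvProcL, List.append_assoc]

-- A's source-collecting fold in pure form
lemma pvSrcA_flatMap (rows colums : Int) (grid : List (List Int)) :
    pvSrcA rows colums grid
      = (PySem.List.pyRange 0 rows 1).flatMap (fun i =>
          ((PySem.List.pyRange 0 colums 1).filter (fun j => pvCellA grid i j = 1)).map
            (fun j => (i, j))) := by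
  unfold pvSrcA
  simp only [PySem.List.foldl_append_ite, PySem.List.foldl_append_eq_flatMap, List.nil_append]

lemma pvSrcB_eq (rows colums : Int) (grid : List (List Int)) :
    pvSrcB rows colums grid = pvSrcA rows colums grid := by
  rw [pvSrcA_flatMap]; rfl

lemma pvRect_eq_product (rows colums : Int) :
    pvRect rows colums = (PySem.List.pyRange 0 rows 1) ×ˢ (PySem.List.pyRange 0 colums 1) := rfl

lemma pvRect_nodup (rows colums : Int) : (pvRect rows colums).Nodup := by
  rw [pvRect_eq_product]
  exact List.Nodup.product (PySem.List.nodup_pyRange_one 0 rows)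
    (PySem.List.nodup_pyRange_one 0 colums)

lemma mem_pvRect (rows colums : Int) (c : Int × Int) :
    c ∈ pvRect rows colums ↔ pvInR rows colums c := by
  obtain ⟨a, b⟩ := c
  rw [pvRect_eq_product]
  simp [PySem.List.mem_pyRange_one, pvInR, and_assoc]

lemma pvSrcA_eq_filter (rows colums : Int) (grid : List (List Int)) :
    pvSrcA rows colums grid
      = (pvRect rows colums).filter (fun p => decide (pvCellA grid p.1 p.2 = 1)) := by
  rw [pvSrcA_flatMap, pvRect, List.filter_flatMap]
  refine List.flatMap_congr (fun i _ => ?_)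
  rw [List.filter_map]
  rfl

lemma pvSrcA_nodup (rows colums : Int) (grid : List (List Int)) :
    (pvSrcA rows colums grid).Nodup := by
  rw [pvSrcA_eq_filter]
  exact (pvRect_nodup rows colums).filter _

lemma mem_pvSrcA (rows colums : Int) (grid : List (List Int)) (c : Int × Int) :
    c ∈ pvSrcA rows colums grid ↔ pvInR rows colums c ∧ pvCellA grid c.1 c.2 = 1 := by
  rw [pvSrcA_eq_filter, List.mem_filter, mem_pvRect]
  simp

-- ---- the main loop returns the maximum distance ----

lemma pvLoopA_max (rows colums : Int) {S : List (Int × Int)} (hS : S ≠ [])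
    (hSR : ∀ s ∈ S, pvInR rows colums s) (MX : Int)
    (hMXub : ∀ c, pvInR rows colums c → pvDist S c ≤ MX)
    (hMXmem : ∃ c, pvInR rows colums c ∧ pvDist S c = MX) :
    ∀ (fuel : Nat) (ℓ : Nat) (g : List (List Int)) (q : List (Int × Int)), 1 ≤ ℓ →
      pvInv rows colums S ℓ g q →
      (∃ c, pvInR rows colums c ∧ pvDist S c = (ℓ : Int) - 1) →
      MX.toNat + 2 ≤ ℓ + fuel →
      pvLoopA rows colums fuel q g ((ℓ : Int) - 1) = MX := by
  intro fuel
  induction fuel with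
  | zero =>
    intro ℓ g q hℓ hinv hprev hfuel
    exfalso
    rcases hprev with ⟨c, hcR, hcd⟩
    have h1 := hMXub c hcR
    rcases hMXmem with ⟨c', hc'R, hc'd⟩
    have h2 : 0 ≤ MX := hc'd ▸ pvDist_nonneg hS c'
    omega
  | succ f ih =>
    intro ℓ g q hℓ hinv hprev hfuel
    by_cases hq : q = []
    · subst hq
      have hred : pvLoopA rows colums (f + 1) [] g ((ℓ : Int) - 1) = (ℓ : Int) - 1 := by
        simp [pvLoopA]
      rw [hred]
      -- every distance is ≤ ℓ-1 (an ℓ-level cell would be in the empty queue), and ℓ-1 is attained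
      rcases hMXmem with ⟨c', hc'R, hc'd⟩
      rcases hprev with ⟨c, hcR, hcd⟩
      have hub : pvDist S c' ≤ (ℓ : Int) - 1 := by
        by_contra hgt
        have h0 : 0 ≤ (ℓ : Int) := by positivity
        have hn : pvDist S c' = (ℓ : Int) + ((pvDist S c' - ℓ).toNat : Int) := by omega
        rcases pvExistsLevel rows colums hS hSR (ℓ : Int) h0 _ c' hc'R hn with ⟨c'', hR, hd⟩
        exact absurd ((hinv.2.2.2 c'').mpr ⟨hR, hd⟩) (List.not_mem_nil)
      have := hMXub c hcR
      omega
    · simp only [pvLoopA, if_neg hq]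
      have hstep := pvStep_procL rows colums q [] g
      rw [List.append_nil] at hstep
      rw [hstep]
      simp only [List.nil_append]
      have hinv' := pvStep_inv rows colums hS hSR ℓ g q hinv
      rcases List.exists_mem_of_ne_nil q hq with ⟨c, hc⟩
      obtain ⟨hcR, hcd⟩ := (hinv.2.2.2 c).mp hc
      have := ih (ℓ + 1) (pvProcL rows colums q g).1 (pvProcL rows colums q g).2
        (by omega) hinv' ⟨c, hcR, by push_cast; omega⟩ (by omega)
      rw [show ((ℓ : Int) - 1 + 1) = ((ℓ + 1 : Nat) : Int) - 1 by push_cast; ring]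
      exact this

-- B's rectangle scan of per-cell minima is the map of pvDist over the rectangle
lemma pvRect_map_dist (rows colums : Int) (S : List (Int × Int)) :
    (PySem.List.pyRange 0 rows 1).flatMap (fun i =>
        (PySem.List.pyRange 0 colums 1).map (fun j =>
          (PySem.List.min? (S.map (fun s => |i - s.1| + |j - s.2|)) (fun y => y)).getD 0))
      = (pvRect rows colums).map (pvDist S) := by
  rw [pvRect, List.map_flatMap]
  simp only [List.map_map]
  rfl

-- ===== VERDICT (by name: the statement is the Claim_ definition above) =====
theorem min_hour_spec : Claim_equal_min_hour := by
  intro rows colums grid _ hpre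
  unfold Spec_min_hour min_hour min_hour_alt
  by_cases hg : grid = []
  · simp [hg]
  · simp only [if_neg hg, pvSrcB_eq]
    by_cases hS : pvSrcA rows colums grid = []
    · simp only [hS]
      simp [pvLoopA]
    · simp only [if_neg hS]
      rcases List.exists_mem_of_ne_nil _ hS with ⟨s₀, hs₀⟩
      have hSR : ∀ s ∈ pvSrcA rows colums grid, pvInR rows colums s :=
        fun s hs => ((mem_pvSrcA rows colums grid s).mp hs).1
      have hs₀R := hSR s₀ hs₀
      have hrows : 0 < rows := by rcases hs₀R with ⟨h1, h2, _, _⟩; omega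
      have hcols : 0 < colums := by rcases hs₀R with ⟨_, _, h3, h4⟩; omega
      -- the rectangle lies inside the grid (Pre_'s surviving disjunct)
      have hwf : pvWF rows colums grid := by
        rcases hpre with rfl | hr' | hc' | ⟨h1, h2⟩
        · exact absurd rfl hg
        · omega
        · omega
        · intro a ha
          have hlen : a < grid.length := lt_of_lt_of_le ha h1
          refine ⟨hlen, ?_⟩
          have hmem : grid.getD a [] ∈ grid.take rows.toNat := by
            rw [List.getD_eq_getElem?_getD, List.getElem?_eq_getElem hlen, Option.getD_some]
            have hlt : a < (grid.take rows.toNat).length := by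
              simp [List.length_take]; omega
            have : (grid.take rows.toNat)[a]'hlt = grid[a] := List.getElem_take ..
            rw [← this]
            exact List.getElem_mem hlt
          exact h2 _ hmem
      -- the value B computes: the maximum distance MX over the rectangle
      rw [pvRect_map_dist rows colums (pvSrcA rows colums grid)]
      have hs₀rect : s₀ ∈ pvRect rows colums := (mem_pvRect rows colums s₀).mpr hs₀R
      cases hmx : PySem.List.max?
          ((pvRect rows colums).map (pvDist (pvSrcA rows colums grid))) (fun y => y) with
      | none =>
        exfalso
        have := (PySem.List.max?_eq_none_iff _ _).mp hmx
        rw [List.map_eq_nil_iff] at this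
        rw [this] at hs₀rect
        exact List.not_mem_nil hs₀rect
      | some MX =>
        simp only [Option.getD_some]
        have hub : ∀ c, pvInR rows colums c → pvDist (pvSrcA rows colums grid) c ≤ MX := by
          intro c hc
          exact PySem.List.max?_isMax hmx _
            (List.mem_map_of_mem ((mem_pvRect rows colums c).mpr hc))
        have hmem : ∃ c, pvInR rows colums c ∧ pvDist (pvSrcA rows colums grid) c = MX := by
          rcases List.mem_map.mp (PySem.List.max?_mem hmx) with ⟨c, hc, he⟩
          exact ⟨c, (mem_pvRect rows colums c).mp hc, he⟩
        -- the invariant at level 0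
        have inv0 : pvInv rows colums (pvSrcA rows colums grid) 0 grid
            (pvSrcA rows colums grid) := by
          refine ⟨hwf, ?_, pvSrcA_nodup rows colums grid, ?_⟩
          · intro c hc
            have hz := pvDist_zero (S := pvSrcA rows colums grid) hS c
            have hnn := pvDist_nonneg (S := pvSrcA rows colums grid) hS c
            unfold pvMk
            rw [show ((0 : Nat) : Int) = 0 from rfl]
            constructor
            · intro h1
              have hm := (mem_pvSrcA rows colums grid c).mpr ⟨hc, h1⟩
              have := hz.mpr hm
              omega
            · intro h1
              have h0 : pvDist (pvSrcA rows colums grid) c = 0 := by omega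
              exact ((mem_pvSrcA rows colums grid c).mp (hz.mp h0)).2
          · intro c
            have hz := pvDist_zero (S := pvSrcA rows colums grid) hS c
            rw [mem_pvSrcA rows colums grid c]
            constructor
            · rintro ⟨h1, h2⟩
              refine ⟨h1, ?_⟩
              have hm := (mem_pvSrcA rows colums grid c).mpr ⟨h1, h2⟩
              have h00 := hz.mpr hm
              push_cast
              omega
            · rintro ⟨h1, h2⟩
              have h0 : pvDist (pvSrcA rows colums grid) c = 0 := by push_cast at h2; omega
              exact ⟨h1, ((mem_pvSrcA rows colums grid c).mp (hz.mp h0)).2⟩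
        -- unfold the first while-iteration (the queue of sources is nonempty)
        simp only [pvLoopA, if_neg hS]
        have hstep := pvStep_procL rows colums (pvSrcA rows colums grid) [] grid
        rw [List.append_nil] at hstep
        rw [hstep]
        simp only [List.nil_append]
        have inv1 := pvStep_inv rows colums hS hSR 0 grid (pvSrcA rows colums grid) inv0
        -- distances are bounded by the rectangle's dimensions, so the fuel suffices
        have hMXbound : MX ≤ (rows - 1) + (colums - 1) := by
          rcases hmem with ⟨c, hcR, hcd⟩
          have h1 := pvDist_le (S := pvSrcA rows colums grid) hS c s₀ hs₀
          rw [pvMan_eq] at h1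
          rcases hcR with ⟨a1, a2, a3, a4⟩
          rcases hs₀R with ⟨b1, b2, b3, b4⟩
          omega
        have hMXnn : 0 ≤ MX := by
          rcases hmem with ⟨c, hcR, hcd⟩
          exact hcd ▸ pvDist_nonneg hS c
        have hfuel : MX.toNat + 2 ≤ 1 + 2 * rows.toNat * colums.toNat := by
          have h1 : rows.toNat ≤ rows.toNat * colums.toNat :=
            Nat.le_mul_of_pos_right _ (by omega)
          have h2 : colums.toNat ≤ rows.toNat * colums.toNat :=
            Nat.le_mul_of_pos_left _ (by omega)
          have h3 : 2 * rows.toNat * colums.toNat = 2 * (rows.toNat * colums.toNat) := by ring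
          omega
        have hd0 : pvDist (pvSrcA rows colums grid) s₀ = ((1 : Nat) : Int) - 1 := by
          have h00 := (pvDist_zero hS s₀).mpr hs₀
          rw [h00]; norm_num
        have := pvLoopA_max rows colums hS hSR MX hub hmem
          (2 * rows.toNat * colums.toNat) 1
          (pvProcL rows colums (pvSrcA rows colums grid) grid).1
          (pvProcL rows colums (pvSrcA rows colums grid) grid).2
          (le_refl 1) inv1 ⟨s₀, hs₀R, hd0⟩ (by omega)
        rw [show (-1 + 1 : Int) = ((1 : Nat) : Int) - 1 by norm_num]
        exact this
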